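-- pv_equiv track=rewrite | github.com/i1as-d/drive_sys_diagnostics | scripts/plot_atopsar_csv_results.py | parse_simple_data_block
-- ===== SOURCE A (Python) =====
-- def parse_simple_data_block(data):
--     lines = data.strip().split('\n')
--     column_titles = lines[0].split()[1:-1]
--     timestamps = []
--     matrix = []
--     last_timestamp = ''
--
--     for line in lines[1:]:
--         elements = (line.split())
--         if elements[0][:2].isdigit():
--             timestamps.append(elements[0])
--             matrix.append(elements[1:])
--             last_timestamp = elements[0]
--         else:
--             matrix.append([last_timestamp] + elements)
--
--     # Transpose the matrix
--     transposed_matrix = [[matrix[j][i] for j in range(len(matrix))] for i in range(len(matrix[0]))]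
--
--     return timestamps, column_titles, transposed_matrix
-- ===== SOURCE B (Python) =====
-- def parse_simple_data_block(data):
--     # One pass: build the columns directly (column count fixed by the first data
--     # row) instead of collecting a row matrix and transposing it afterwards.
--     lines = data.strip().split('\n')
--     column_titles = lines[0].split()[1:-1]
--     timestamps = []
--     last_timestamp = ''
--     # column count = width of the first data row (lines[1] raises when absent)
--     first = lines[1].split()
--     width = len(first) - 1 if first[0][:2].isdigit() else len(first) + 1
--     cols = [[] for _ in range(width)]
--     for line in lines[1:]:
--         elements = line.split()
--         if elements[0][:2].isdigit():
--             timestamps.append(elements[0])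
--             last_timestamp = elements[0]
--             row = elements[1:]
--         else:
--             row = [last_timestamp] + elements
--         for i in range(len(cols)):
--             cols[i].append(row[i])
--     return timestamps, column_titles, cols
-- ===== Notes on version B (the rewrite author's own statement) =====
-- stated objective: alternative
-- what changed: B builds the C column lists directly in a single pass over the data lines (C fixed by the first data row) instead of A's row-major matrix followed by a nested-index transpose comprehension.
import Mathlib
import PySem

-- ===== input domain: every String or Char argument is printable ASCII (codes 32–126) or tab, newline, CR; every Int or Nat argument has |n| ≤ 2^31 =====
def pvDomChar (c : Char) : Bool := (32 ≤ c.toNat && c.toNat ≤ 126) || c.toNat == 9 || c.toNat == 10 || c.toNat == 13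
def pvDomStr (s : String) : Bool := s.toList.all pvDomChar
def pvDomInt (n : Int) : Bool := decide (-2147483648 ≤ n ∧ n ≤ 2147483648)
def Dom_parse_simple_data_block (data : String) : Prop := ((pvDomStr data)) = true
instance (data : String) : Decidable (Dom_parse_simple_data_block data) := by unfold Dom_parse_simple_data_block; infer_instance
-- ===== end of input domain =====

-- B builds the output columns directly in one pass (column count fixed by the first data
-- line) instead of collecting a row matrix and transposing it afterwards (objective: alternative).

-- elements[0][:2].isdigit()  (shared literal expression of both Pythons)
def pvIsTs (e0 : String) : Bool := PySem.Str.strIsdigit (PySem.Str.slice e0 none (some 2))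

-- ===== PORT A =====
-- loop body of A: state = (timestamps, matrix, last_timestamp)
def pvA_step (st : List String × List (List String) × String) (line : String) :
    List String × List (List String) × String :=
  match PySem.Str.split₀ line with
  | [] => st          -- Python: elements[0] raises IndexError; excluded by Pre_
  | e0 :: rest =>
    if pvIsTs e0 then (st.1 ++ [e0], st.2.1 ++ [rest], e0)
    else (st.1, st.2.1 ++ [st.2.2 :: (e0 :: rest)], st.2.2)

def parse_simple_data_block (data : String) : List String × List String × List (List String) :=
  let lines := (PySem.Str.split? (PySem.Str.strip data) "\n").getD []   -- sep "\n" ≠ "", never none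
  let column_titles := PySem.List.slice (PySem.Str.split₀ (PySem.List.pyGetD lines 0 "")) (some 1) (some (-1))
  let st := (PySem.List.slice lines (some 1) none).foldl pvA_step ([], [], "")
  -- transpose: [[matrix[j][i] for j in range(len(matrix))] for i in range(len(matrix[0]))]
  -- (matrix[0] when matrix == [] and matrix[j][i] out of range raise IndexError in Python; excluded by Pre_)
  let transposed := (PySem.List.pyRange 0 ((PySem.List.pyGetD st.2.1 0 []).length : Int) 1).map
      (fun i => (PySem.List.pyRange 0 (st.2.1.length : Int) 1).map
        (fun j => PySem.List.pyGetD (PySem.List.pyGetD st.2.1 j []) i ""))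
  (st.1, column_titles, transposed)

-- ===== PORT B =====
-- B's width of a data line: len(first) - 1 for a timestamp row, len(first) + 1 otherwise
-- (on a line splitting to [] Python raises IndexError at first[0]; excluded by Pre_)
def pvWidth (line : String) : Nat :=
  match PySem.Str.split₀ line with
  | [] => 0
  | e0 :: rest => if pvIsTs e0 then rest.length else rest.length + 2

-- loop body of B: state = (timestamps, cols, last_timestamp)
def pvB_step (st : List String × List (List String) × String) (line : String) :
    List String × List (List String) × String :=
  match PySem.Str.split₀ line with
  | [] => st          -- Python: elements[0] raises IndexError; excluded by Pre_
  | e0 :: rest =>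
    let tlr : List String × String × List String :=
      if pvIsTs e0 then (st.1 ++ [e0], e0, rest)
      else (st.1, st.2.2, st.2.2 :: (e0 :: rest))
    -- for i in range(len(cols)): cols[i].append(row[i])   (row[i] raises when the row is too short; excluded by Pre_)
    (tlr.1,
     (PySem.List.pyRange 0 (st.2.1.length : Int) 1).map
       (fun i => PySem.List.pyGetD st.2.1 i [] ++ [PySem.List.pyGetD tlr.2.2 i ""]),
     tlr.2.1)

def parse_simple_data_block_alt (data : String) : List String × List String × List (List String) :=
  let lines := (PySem.Str.split? (PySem.Str.strip data) "\n").getD []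
  let column_titles := PySem.List.slice (PySem.Str.split₀ (PySem.List.pyGetD lines 0 "")) (some 1) (some (-1))
  -- width = len(lines[1].split()) ∓ 1  (lines[1] raises IndexError when absent; excluded by Pre_)
  let width := pvWidth (PySem.List.pyGetD lines 1 "")
  -- cols = [[] for _ in range(width)]
  let cols : List (List String) := (PySem.List.pyRange 0 (width : Int) 1).map (fun _ => [])
  let st := (PySem.List.slice lines (some 1) none).foldl pvB_step ([], cols, "")
  (st.1, column_titles, st.2.1)

-- ===== PRECONDITION & SPEC =====
-- Pre_ excludes exactly the inputs where Python A raises IndexError: no data line after the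
-- header, a blank data line (elements[0]), or a data row narrower than the first data row
-- (matrix[j][i] in the transpose). Shape conditions on the line splits only.
def Pre_parse_simple_data_block (data : String) : Prop :=
  let lines := (PySem.Str.split? (PySem.Str.strip data) "\n").getD []
  2 ≤ lines.length ∧
  ∀ line ∈ lines.drop 1,
    PySem.Str.split₀ line ≠ [] ∧ pvWidth (lines.getD 1 "") ≤ pvWidth line
instance (data : String) : Decidable (Pre_parse_simple_data_block data) := by
  unfold Pre_parse_simple_data_block; infer_instance

def pvWitness_parse_simple_data_block : String := "t a b end\n12 x y\n.. z w"

def Spec_parse_simple_data_block (data : String) (out : List String × List String × List (List String)) : Prop := out = parse_simple_data_block_alt data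
instance (data : String) (out : List String × List String × List (List String)) : Decidable (Spec_parse_simple_data_block data out) := by unfold Spec_parse_simple_data_block; infer_instance

-- ===== CLAIM (what is proved, stated in full; the proofs are below) =====
def Claim_equal_parse_simple_data_block : Prop := ∀ (data : String), Dom_parse_simple_data_block data → Pre_parse_simple_data_block data → Spec_parse_simple_data_block data (parse_simple_data_block data)

-- ===== LEMMAS AND PROOFS =====

-- the columns B maintains, expressed from A's row matrix
def pvColsOf (C : Nat) (mat : List (List String)) : List (List String) :=
  (PySem.List.pyRange 0 (C : Int) 1).map (fun i => mat.map (fun r => PySem.List.pyGetD r i ""))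

theorem pvColsOf_snoc (C : Nat) (mat : List (List String)) (row : List String) :
    (PySem.List.pyRange 0 ((pvColsOf C mat).length : Int) 1).map
      (fun i => PySem.List.pyGetD (pvColsOf C mat) i [] ++ [PySem.List.pyGetD row i ""])
    = pvColsOf C (mat ++ [row]) := by
  unfold pvColsOf
  rw [List.length_map, PySem.List.length_pyRange_one]
  simp only [Int.sub_zero, Int.toNat_natCast]
  apply List.map_congr_left
  intro i hi
  rw [PySem.List.mem_pyRange_one] at hi
  rw [PySem.List.pyGetD_map_pyRange_of_nonneg _ _ _ _ hi.1 hi.2]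
  simp

theorem pvStep_rel (C : Nat) (st : List String × List (List String) × String) (line : String) :
    pvB_step (st.1, pvColsOf C st.2.1, st.2.2) line
      = ((pvA_step st line).1, pvColsOf C (pvA_step st line).2.1, (pvA_step st line).2.2) := by
  unfold pvA_step pvB_step
  cases h : PySem.Str.split₀ line with
  | nil => rfl
  | cons e0 rest =>
    by_cases hts : pvIsTs e0
    · simp only [hts, if_true]
      exact Prod.ext rfl (Prod.ext (pvColsOf_snoc C st.2.1 rest) rfl)
    · simp only [hts]
      exact Prod.ext rfl (Prod.ext (pvColsOf_snoc C st.2.1 (st.2.2 :: (e0 :: rest))) rfl)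

theorem pvFold_rel (C : Nat) (ls : List String) :
    ∀ (st : List String × List (List String) × String),
      ls.foldl pvB_step (st.1, pvColsOf C st.2.1, st.2.2)
        = ((ls.foldl pvA_step st).1, pvColsOf C (ls.foldl pvA_step st).2.1, (ls.foldl pvA_step st).2.2) := by
  induction ls with
  | nil => intro st; rfl
  | cons l ls ih =>
    intro st
    simp only [List.foldl_cons, pvStep_rel C st l]
    exact ih _

-- A only appends to the matrix, so an initial row stays its head
theorem pvA_fold_mat (ls : List String) :
    ∀ (st : List String × List (List String) × String),
      ∃ ext, (ls.foldl pvA_step st).2.1 = st.2.1 ++ ext := by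
  induction ls with
  | nil => intro st; exact ⟨[], by simp⟩
  | cons l ls ih =>
    intro st
    have hstep : ∃ e, (pvA_step st l).2.1 = st.2.1 ++ e := by
      unfold pvA_step
      cases h : PySem.Str.split₀ l with
      | nil => exact ⟨[], by simp⟩
      | cons e0 rest =>
        by_cases hts : pvIsTs e0
        · exact ⟨[rest], by simp [hts]⟩
        · exact ⟨[st.2.2 :: (e0 :: rest)], by simp [hts]⟩
    obtain ⟨e, he⟩ := hstep
    obtain ⟨ext, hext⟩ := ih (pvA_step st l)
    exact ⟨e ++ ext, by rw [List.foldl_cons, hext, he, List.append_assoc]⟩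

-- A's nested-index transpose is exactly pvColsOf (len matrix[0]) matrix
theorem pvTranspose_eq (C : Nat) (mat : List (List String)) :
    (PySem.List.pyRange 0 (C : Int) 1).map
      (fun i => (PySem.List.pyRange 0 (mat.length : Int) 1).map
        (fun j => PySem.List.pyGetD (PySem.List.pyGetD mat j []) i ""))
    = pvColsOf C mat := by
  unfold pvColsOf
  apply List.map_congr_left
  intro i _
  have hcomp : (fun j => PySem.List.pyGetD (PySem.List.pyGetD mat j []) i "")
      = (fun r => PySem.List.pyGetD r i "") ∘ (fun j => PySem.List.pyGetD mat j []) := rfl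
  rw [hcomp, ← List.map_map, PySem.List.map_pyGetD_pyRange_zero']

-- ===== VERDICT (by name: the statement is the Claim_ definition above) =====
theorem parse_simple_data_block_spec : Claim_equal_parse_simple_data_block := by
  intro data _ hpre
  unfold Spec_parse_simple_data_block parse_simple_data_block parse_simple_data_block_alt
  unfold Pre_parse_simple_data_block at hpre
  cases hl : (PySem.Str.split? (PySem.Str.strip data) "\n").getD [] with
  | nil => rw [hl] at hpre; simp at hpre
  | cons l0 t =>
    cases t with
    | nil => rw [hl] at hpre; simp at hpre
    | cons l1 ls =>
      rw [hl] at hpre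
      obtain ⟨-, hall⟩ := hpre
      obtain ⟨hne, -⟩ := hall l1 (by simp)
      obtain ⟨e0, rest, hsplit⟩ : ∃ e0 rest, PySem.Str.split₀ l1 = e0 :: rest := by
        cases h : PySem.Str.split₀ l1 with
        | nil => exact absurd h hne
        | cons a b => exact ⟨a, b, rfl⟩
      have hidx : PySem.List.pyGetD (l0 :: l1 :: ls) 1 "" = l1 := by
        have h1 : (1 : Int) = ((1 : Nat) : Int) := rfl
        rw [h1, PySem.List.pyGetD_natCast]; rfl
      -- the first fold step creates the first matrix row, of length pvWidth l1
      have hstep : ∃ ts1 last1 row1, row1.length = pvWidth l1 ∧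
          pvA_step ([], [], "") l1 = (ts1, [row1], last1) ∧
          pvB_step ([], (PySem.List.pyRange 0 ((pvWidth l1 : Nat) : Int) 1).map (fun _ => []), "") l1
            = (ts1, pvColsOf (pvWidth l1) [row1], last1) := by
        unfold pvA_step pvB_step pvWidth
        rw [hsplit]
        by_cases hts : pvIsTs e0
        · refine ⟨[e0], e0, rest, by simp [hts], by simp [hts], ?_⟩
          simp only [hts, if_true]
          refine Prod.ext rfl (Prod.ext ?_ rfl)
          have h0 : (PySem.List.pyRange 0 ((rest.length : Nat) : Int) 1).map (fun _ => ([] : List String))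
              = pvColsOf rest.length [] := List.map_congr_left (fun i _ => rfl)
          rw [h0]
          exact (pvColsOf_snoc rest.length [] rest).trans (by simp)
        · refine ⟨[], "", "" :: e0 :: rest, by simp [hts], by simp [hts], ?_⟩
          simp only [hts, Bool.false_eq_true, if_false]
          refine Prod.ext rfl (Prod.ext ?_ rfl)
          have h0 : (PySem.List.pyRange 0 (((rest.length + 2 : Nat)) : Int) 1).map (fun _ => ([] : List String))
              = pvColsOf (rest.length + 2) [] := List.map_congr_left (fun i _ => rfl)
          rw [h0]
          simpa using pvColsOf_snoc (rest.length + 2) [] ("" :: e0 :: rest)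
      obtain ⟨ts1, last1, row1, hrowlen, hA1, hB1⟩ := hstep
      obtain ⟨ext, hext⟩ := pvA_fold_mat ls (ts1, [row1], last1)
      simp only at hext
      have hfold := pvFold_rel (pvWidth l1) ls (ts1, [row1], last1)
      simp only at hfold
      simp only [PySem.List.slice_from_one, List.tail_cons, hidx, List.foldl_cons, hA1, hB1,
        hfold, hext, pvTranspose_eq, PySem.List.pyGetD_zero_cons, List.cons_append]
      rw [hrowlen]
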